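-- pv_equiv track=rewrite | github.com/nachocatee/Baekjoon | 백준/Silver/20529. 가장 가까운 세 사람의 심리적 거리/가장 가까운 세 사람의 심리적 거리.py | check
-- ===== SOURCE A (Python) =====
-- def check(lst):
--     cnt = 0
--     for i in range(4):
--         if lst[0][i] != lst[1][i]:
--             cnt += 1
--         if lst[1][i] != lst[2][i]:
--             cnt += 1
--         if lst[2][i] != lst[0][i]:
--             cnt += 1
--     return cnt
-- ===== SOURCE B (Python) =====
-- def check(lst):
--     cnt = 0
--     for i in range(4):
--         d = len({lst[0][i], lst[1][i], lst[2][i]})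
--         cnt += {1: 0, 2: 2, 3: 3}[d]
--     return cnt
-- ===== Notes on version B (the rewrite author's own statement) =====
-- stated objective: simpler
-- what changed: Replaces the three explicit pairwise character comparisons per position with counting the distinct characters at that position (a set) and mapping its size {1:0,2:2,3:3} to the number of differing pairs.
import Mathlib
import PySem

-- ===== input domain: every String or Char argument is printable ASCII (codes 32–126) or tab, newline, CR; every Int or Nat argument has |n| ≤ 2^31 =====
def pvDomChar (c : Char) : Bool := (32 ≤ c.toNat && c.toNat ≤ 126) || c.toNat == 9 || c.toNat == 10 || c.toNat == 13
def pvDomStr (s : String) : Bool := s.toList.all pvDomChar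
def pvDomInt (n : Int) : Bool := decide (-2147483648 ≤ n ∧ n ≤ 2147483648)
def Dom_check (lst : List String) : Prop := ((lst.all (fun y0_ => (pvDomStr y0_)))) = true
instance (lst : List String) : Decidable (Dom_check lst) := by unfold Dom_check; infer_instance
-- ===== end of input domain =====

-- B replaces the three pairwise comparisons per position by a distinct-character count mapped
-- through the table {1:0, 2:2, 3:3} (objective: simpler).

-- lst[k][i]: both Pythons index identically; the defaults are never reached under Pre_check
-- (Pre_check excludes exactly the IndexError inputs).
def chAt (lst : List String) (k i : Int) : Char :=
  (PySem.Str.pyGet? ((PySem.List.pyGet? lst k).getD "") i).getD ' '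

-- ===== PORT A =====
def check (lst : List String) : Int :=
  (PySem.List.pyRange 0 4 1).foldl (fun cnt i =>
    let cnt := if chAt lst 0 i ≠ chAt lst 1 i then cnt + 1 else cnt
    let cnt := if chAt lst 1 i ≠ chAt lst 2 i then cnt + 1 else cnt
    let cnt := if chAt lst 2 i ≠ chAt lst 0 i then cnt + 1 else cnt
    cnt) 0

-- ===== PORT B =====
-- the dict literal {1: 0, 2: 2, 3: 3}
def diffTable : PySem.Dict Int Int := PySem.Dict.ofList [(1, 0), (2, 2), (3, 3)]

def check_alt (lst : List String) : Int :=
  (PySem.List.pyRange 0 4 1).foldl (fun cnt i =>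
    let d : Int := PySem.Set.len (PySem.Set.ofList [chAt lst 0 i, chAt lst 1 i, chAt lst 2 i])
    -- KeyError is impossible: d ∈ {1,2,3}; the .getD 0 default is never reached
    cnt + (PySem.Dict.get? diffTable d).getD 0) 0

-- ===== PRECONDITION & SPEC =====
-- Exactly the inputs where Python A returns: it reads lst[0..2] and character indices 0..3,
-- so at least three strings, the first three each of length ≥ 4 (else IndexError).
def Pre_check (lst : List String) : Prop :=
  3 ≤ lst.length ∧ 4 ≤ (lst.getD 0 "").toList.length ∧
    4 ≤ (lst.getD 1 "").toList.length ∧ 4 ≤ (lst.getD 2 "").toList.length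
instance (lst : List String) : Decidable (Pre_check lst) := by unfold Pre_check; infer_instance

def pvWitness_check : List String := (["MMMM", "SSSS", "MSMS"])

def Spec_check (lst : List String) (out : Int) : Prop := out = check_alt lst
instance (lst : List String) (out : Int) : Decidable (Spec_check lst out) := by unfold Spec_check; infer_instance

-- ===== CLAIM (what is proved, stated in full; the proofs are below) =====
def Claim_equal_check : Prop := ∀ (lst : List String), Dom_check lst → Pre_check lst → Spec_check lst (check lst)

-- ===== LEMMAS AND PROOFS =====

-- table lookups, evaluated once
theorem tbl1 : (PySem.Dict.get? diffTable 1).getD 0 = 0 := by decide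
theorem tbl2 : (PySem.Dict.get? diffTable 2).getD 0 = 2 := by decide
theorem tbl3 : (PySem.Dict.get? diffTable 3).getD 0 = 3 := by decide

-- per-position core: A's three indicator increments = B's distinct-count table lookup
theorem step_eq (c : Int) (x y z : Char) :
    (let c1 := if x ≠ y then c + 1 else c
     let c2 := if y ≠ z then c1 + 1 else c1
     if z ≠ x then c2 + 1 else c2)
    = c + (PySem.Dict.get? diffTable
            (PySem.Set.len (PySem.Set.ofList [x, y, z]))).getD 0 := by
  by_cases hxy : x = y <;> by_cases hyz : y = z <;> by_cases hzx : z = x <;>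
    simp_all [PySem.Set.ofList, PySem.Set.add, PySem.Set.empty, PySem.Set.contains,
      PySem.Set.len, List.foldl, eq_comm, tbl1, tbl2, tbl3] <;> omega

theorem range4 : PySem.List.pyRange 0 4 1 = [0, 1, 2, 3] := by decide

-- ===== VERDICT (by name: the statement is the Claim_ definition above) =====
theorem check_spec : Claim_equal_check := by
  intro lst _ _
  unfold Spec_check check check_alt
  rw [range4]
  simp only [List.foldl]
  rw [step_eq, step_eq, step_eq, step_eq]
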